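-- pv_equiv track=rewrite | github.com/encryptogroup/LEAKER | leaker/attack/glmp18.py | __augment_nec
-- ===== SOURCE A (Python) =====
-- import itertools
-- from typing import List, Set, Iterable, Tuple, FrozenSet
--
-- def __augment_nec(v_cand: Set[int], v_nec: Set[int], o_v_comp: Set[int], n_min: int) -> Set[int]:
--     if len(v_cand) == n_min:
--         return v_cand.copy()
--
--     v_nec = v_nec.copy()  # since we alter v_nec here
--
--     for e in o_v_comp:
--         for v in v_cand.difference(v_nec):
--             diff = v_cand.difference({v})
--             if all(abs(prod[0] - prod[1]) != e for prod in itertools.combinations(diff, 2)):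
--                 v_nec.add(v)
--
--     for v in v_cand.difference(v_nec):
--         diff = v_cand.difference({v})
--         if all(abs(prod[0] - prod[1]) != v for prod in itertools.combinations(diff, 2)):
--             v_nec.add(v)
--
--     return v_nec
-- ===== SOURCE B (Python) =====
-- import itertools
--
--
-- def __augment_nec(v_cand, v_nec, o_v_comp, n_min):
--     if len(v_cand) == n_min:
--         return v_cand.copy()
--
--     # Precompute, once, how many unordered pairs of v_cand are at each distance.
--     diff_count = {}
--     for a, b in itertools.combinations(v_cand, 2):
--         d = abs(a - b)
--         diff_count[d] = diff_count.get(d, 0) + 1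
--
--     def isolated(v, e):
--         # True iff no pair of v_cand \ {v} is at distance e: subtract from the
--         # global count the pairs involving v (its neighbours v-e and v+e).
--         if e <= 0:
--             return True
--         t = diff_count.get(e, 0)
--         if v - e in v_cand:
--             t -= 1
--         if v + e in v_cand:
--             t -= 1
--         return t == 0
--
--     nec = v_nec.copy()
--     for e in o_v_comp:
--         for v in v_cand:
--             if v not in nec and isolated(v, e):
--                 nec.add(v)
--     for v in v_cand:
--         if v not in nec and isolated(v, v):
--             nec.add(v)
--     return nec
-- ===== Notes on version B (the rewrite author's own statement) =====
-- stated objective: faster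
-- what changed: Instead of re-enumerating all pairs of v_cand\{v} for every (e, v), B builds a pairwise-distance counter once and decides each (e, v) test in O(1) by subtracting the pairs involving v (membership of v-e and v+e).
import Mathlib
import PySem

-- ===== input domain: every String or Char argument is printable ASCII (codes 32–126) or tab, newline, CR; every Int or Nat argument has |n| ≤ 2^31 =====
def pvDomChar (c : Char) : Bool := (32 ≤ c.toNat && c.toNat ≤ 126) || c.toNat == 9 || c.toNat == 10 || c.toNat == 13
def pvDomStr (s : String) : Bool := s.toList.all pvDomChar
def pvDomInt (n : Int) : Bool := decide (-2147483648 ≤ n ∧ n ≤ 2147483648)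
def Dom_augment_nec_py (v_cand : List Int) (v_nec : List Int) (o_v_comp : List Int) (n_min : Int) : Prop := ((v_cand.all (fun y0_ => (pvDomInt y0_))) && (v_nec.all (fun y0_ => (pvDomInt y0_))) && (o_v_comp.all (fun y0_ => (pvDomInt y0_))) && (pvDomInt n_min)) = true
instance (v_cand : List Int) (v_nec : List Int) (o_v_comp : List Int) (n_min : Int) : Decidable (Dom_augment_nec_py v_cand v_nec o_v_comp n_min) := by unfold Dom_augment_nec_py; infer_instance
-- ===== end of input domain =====

-- B replaces the per-(e,v) scan over all pairs of v_cand\{v} by a pairwise-distance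
-- counter built once, deciding each test by O(1) membership of v-e and v+e (faster).

-- ===== PORT A =====
-- itertools.combinations(xs, 2), in iteration order
def pyCombos2 (xs : List Int) : List (Int × Int) :=
  match xs with
  | [] => []
  | x :: rest => rest.map (fun y => (x, y)) ++ pyCombos2 rest

-- "all(abs(prod[0] - prod[1]) != e for prod in itertools.combinations(v_cand - {v}, 2))"
def necCheckA (v_cand : List Int) (v e : Int) : Bool :=
  (pyCombos2 (PySem.Set.diff v_cand [v])).all (fun p => decide (|p.1 - p.2| ≠ e))

def augment_nec_py (v_cand : List Int) (v_nec : List Int) (o_v_comp : List Int) (n_min : Int) : List Int :=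
  if (v_cand.length : Int) = n_min then v_cand
  else
    let nec1 := o_v_comp.foldl (fun nec e =>
      (PySem.Set.diff v_cand nec).foldl (fun nec2 v =>
        if necCheckA v_cand v e then PySem.Set.add nec2 v else nec2) nec) v_nec
    (PySem.Set.diff v_cand nec1).foldl (fun nec2 v =>
      if necCheckA v_cand v v then PySem.Set.add nec2 v else nec2) nec1

-- ===== PORT B =====
-- the pairwise-distance counter diff_count
def diffCounter (v_cand : List Int) : PySem.Dict Int Int :=
  (pyCombos2 v_cand).foldl
    (fun d p => d.insert (|p.1 - p.2|) (d.getD (|p.1 - p.2|) 0 + 1)) PySem.Dict.empty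

def necCheckB (v_cand : List Int) (d : PySem.Dict Int Int) (v e : Int) : Bool :=
  if e ≤ 0 then true
  else
    let t0 := d.getD e 0
    let t1 := if v_cand.contains (v - e) then t0 - 1 else t0
    let t2 := if v_cand.contains (v + e) then t1 - 1 else t1
    t2 == 0

def augment_nec_py_alt (v_cand : List Int) (v_nec : List Int) (o_v_comp : List Int) (n_min : Int) : List Int :=
  if (v_cand.length : Int) = n_min then v_cand
  else
    let d := diffCounter v_cand
    let nec1 := o_v_comp.foldl (fun nec e =>
      v_cand.foldl (fun nec2 v =>
        if !nec2.contains v && necCheckB v_cand d v e then PySem.Set.add nec2 v else nec2) nec) v_nec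
    v_cand.foldl (fun nec2 v =>
      if !nec2.contains v && necCheckB v_cand d v v then PySem.Set.add nec2 v else nec2) nec1

-- ===== PRECONDITION & SPEC =====
-- Pre_: the arguments are Python sets, so v_cand arrives as a list of DISTINCT elements
-- (the standard set convention); nothing else is excluded.
def Pre_augment_nec_py (v_cand : List Int) (v_nec : List Int) (o_v_comp : List Int) (n_min : Int) : Prop :=
  v_cand.Nodup

instance (v_cand : List Int) (v_nec : List Int) (o_v_comp : List Int) (n_min : Int) : Decidable (Pre_augment_nec_py v_cand v_nec o_v_comp n_min) := by unfold Pre_augment_nec_py; infer_instance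

def pvWitness_augment_nec_py : List Int × List Int × List Int × Int := ([1, 3, 6], [3], [2, 5], 0)

def Spec_augment_nec_py (v_cand : List Int) (v_nec : List Int) (o_v_comp : List Int) (n_min : Int) (out : List Int) : Prop := out = augment_nec_py_alt v_cand v_nec o_v_comp n_min
instance (v_cand : List Int) (v_nec : List Int) (o_v_comp : List Int) (n_min : Int) (out : List Int) : Decidable (Spec_augment_nec_py v_cand v_nec o_v_comp n_min out) := by unfold Spec_augment_nec_py; infer_instance

-- ===== CLAIM (what is proved, stated in full; the proofs are below) =====
def Claim_equal_augment_nec_py : Prop := ∀ (v_cand : List Int) (v_nec : List Int) (o_v_comp : List Int) (n_min : Int), Dom_augment_nec_py v_cand v_nec o_v_comp n_min → Pre_augment_nec_py v_cand v_nec o_v_comp n_min → Spec_augment_nec_py v_cand v_nec o_v_comp n_min (augment_nec_py v_cand v_nec o_v_comp n_min)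

-- ===== LEMMAS AND PROOFS =====

theorem pyCombos2_cons (x : Int) (rest : List Int) :
    pyCombos2 (x :: rest) = rest.map (fun y => (x, y)) ++ pyCombos2 rest := rfl

theorem countP_map_pair (x e : Int) (l : List Int) :
    (l.map (fun y => (x, y))).countP (fun p => decide (|p.1 - p.2| = e))
      = l.countP (fun w => decide (|x - w| = e)) := by
  rw [List.countP_map]
  rfl

theorem filter_ne_self {rest : List Int} {x : Int} (hx : x ∉ rest) :
    rest.filter (fun y => !(y == x)) = rest := by
  apply List.filter_eq_self.2
  intro y hy
  have hyx : y ≠ x := fun hh => hx (hh ▸ hy)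
  simp [hyx]

-- pairs produced by pyCombos2 over a Nodup list have distinct components
theorem pyCombos2_ne {xs : List Int} (h : xs.Nodup) :
    ∀ p ∈ pyCombos2 xs, p.1 ≠ p.2 := by
  induction xs with
  | nil => intro p hp; simp [pyCombos2] at hp
  | cons x rest ih =>
    intro p hp
    rcases List.nodup_cons.1 h with ⟨hx, hr⟩
    simp only [pyCombos2_cons, List.mem_append, List.mem_map] at hp
    rcases hp with ⟨y, hy, rfl⟩ | hp
    · intro hxy
      simp only at hxy
      exact hx (hxy ▸ hy)
    · exact ih hr p hp

-- the counter counts pairs at each distance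
theorem diffCounter_getD (xs : List Int) (e : Int) :
    (diffCounter xs).getD e 0 = ((pyCombos2 xs).countP (fun p => decide (|p.1 - p.2| = e)) : Int) := by
  have hfold : diffCounter xs
      = ((pyCombos2 xs).map (fun p => |p.1 - p.2|)).foldl
          (fun d x => d.insert x (d.getD x 0 + 1)) PySem.Dict.empty := by
    rw [List.foldl_map]
    rfl
  have h0 : (PySem.Dict.empty : PySem.Dict Int Int).getD e 0 = 0 := rfl
  rw [hfold, PySem.Dict.getD_foldl_insert_add_one, h0, zero_add,
    List.count_eq_countP, List.countP_map]
  congr 1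

-- splitting a countP at a distinguished element
theorem countP_split_elem {l : List Int} {v : Int} (q : Int → Bool)
    (hv : v ∈ l) (h : l.Nodup) :
    l.countP q = (l.filter (fun y => !(y == v))).countP q + (if q v then 1 else 0) := by
  induction l with
  | nil => cases hv
  | cons x rest ih =>
    rcases List.nodup_cons.1 h with ⟨hx, hr⟩
    rcases List.mem_cons.1 hv with h1 | h1
    · subst h1
      rw [List.countP_cons, List.filter_cons]
      simp only [BEq.rfl, Bool.not_true, Bool.false_eq_true, if_false]
      rw [filter_ne_self hx]
    · have hxv : x ≠ v := fun hh => hx (hh ▸ h1)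
      have hxv' : (x == v) = false := by simp [hxv]
      rw [List.countP_cons, List.filter_cons]
      simp only [hxv', Bool.not_false, if_true, List.countP_cons]
      rw [ih h1 hr]
      omega

-- removing v from xs removes exactly the pairs involving v
theorem countP_combos_filter {xs : List Int} {v e : Int}
    (hv : v ∈ xs) (h : xs.Nodup) :
    (pyCombos2 xs).countP (fun p => decide (|p.1 - p.2| = e))
      = (pyCombos2 (xs.filter (fun y => !(y == v)))).countP (fun p => decide (|p.1 - p.2| = e))
        + (xs.filter (fun y => !(y == v))).countP (fun w => decide (|v - w| = e)) := by
  induction xs with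
  | nil => cases hv
  | cons x rest ih =>
    rcases List.nodup_cons.1 h with ⟨hx, hr⟩
    rcases List.mem_cons.1 hv with h1 | h1
    · subst h1
      rw [pyCombos2_cons, List.countP_append, countP_map_pair, List.filter_cons]
      simp only [BEq.rfl, Bool.not_true, Bool.false_eq_true, if_false]
      rw [filter_ne_self hx]
      omega
    · have hxv : x ≠ v := fun hh => hx (hh ▸ h1)
      have hxv' : (x == v) = false := by simp [hxv]
      rw [pyCombos2_cons, List.countP_append, countP_map_pair, List.filter_cons]
      simp only [hxv', Bool.not_false, if_true]
      rw [pyCombos2_cons, List.countP_append, countP_map_pair, List.countP_cons,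
        ih h1 hr, countP_split_elem (fun w => decide (|x - w| = e)) h1 hr]
      have habs : (decide (|x - v| = e) : Bool) = decide (|v - x| = e) := by
        rw [abs_sub_comm]
      rw [habs]
      omega

-- the pairs involving v at distance e > 0 are exactly the members v-e, v+e
theorem countP_neighbors {xs : List Int} {v e : Int} (he : 0 < e) (h : xs.Nodup) :
    (xs.filter (fun y => !(y == v))).countP (fun w => decide (|v - w| = e))
      = (if (v - e) ∈ xs then 1 else 0) + (if (v + e) ∈ xs then 1 else 0) := by
  induction xs with
  | nil => simp
  | cons x rest ih =>
    rcases List.nodup_cons.1 h with ⟨hx, hr⟩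
    rw [List.filter_cons]
    by_cases hxv : x = v
    · simp only [show (x == v) = true by simp [hxv], Bool.not_true, Bool.false_eq_true, if_false]
      rw [ih hr]
      have h1 : ¬ (v - e = x) := by rw [hxv]; omega
      have h2 : ¬ (v + e = x) := by rw [hxv]; omega
      simp only [List.mem_cons]
      rw [if_congr (or_iff_right h1) rfl rfl, if_congr (or_iff_right h2) rfl rfl]
    · have hiff : |v - x| = e ↔ (v - e = x ∨ v + e = x) := by
        rw [abs_eq (le_of_lt he)]
        constructor <;> rintro (hh | hh) <;> omega
      simp only [show (x == v) = false by simp [hxv], Bool.not_false, if_true, List.countP_cons]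
      rw [ih hr]
      simp only [List.mem_cons]
      by_cases hc1 : v - e = x
      · have hm1 : v - e ∉ rest := fun hh => hx (hc1 ▸ hh)
        have hc2 : ¬ (v + e = x) := by omega
        have habs : (decide (|v - x| = e) : Bool) = true := by simp [hiff, hc1]
        by_cases hm2 : v + e ∈ rest <;> simp [habs, hc1, hm1, hc2, hm2] <;> omega
      · by_cases hc2 : v + e = x
        · have hm2 : v + e ∉ rest := fun hh => hx (hc2 ▸ hh)
          have habs : (decide (|v - x| = e) : Bool) = true := by simp [hiff, hc2]
          by_cases hm1 : v - e ∈ rest <;> simp [habs, hc1, hc2, hm1, hm2] <;> omega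
        · have habs : (decide (|v - x| = e) : Bool) = false := by simp [hiff, hc1, hc2]
          by_cases hm1 : v - e ∈ rest <;> by_cases hm2 : v + e ∈ rest <;>
            simp [habs, hc1, hc2, hm1, hm2] <;> omega

-- the O(1) membership test of B equals the pair scan of A
theorem necCheck_eq {v_cand : List Int} (h : v_cand.Nodup) {v : Int} (hv : v ∈ v_cand) (e : Int) :
    necCheckA v_cand v e = necCheckB v_cand (diffCounter v_cand) v e := by
  have hdiff : PySem.Set.diff v_cand [v] = v_cand.filter (fun y => !(y == v)) := by
    unfold PySem.Set.diff
    apply List.filter_congr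
    intro y _
    by_cases hyv : y = v <;> simp [PySem.Set.contains, hyv]
  have hallcount : necCheckA v_cand v e
      = ((pyCombos2 (v_cand.filter (fun y => !(y == v)))).countP (fun p => decide (|p.1 - p.2| = e)) == 0) := by
    unfold necCheckA
    rw [hdiff]
    rw [Bool.eq_iff_iff]
    constructor
    · intro hall
      rw [List.all_eq_true] at hall
      rw [beq_iff_eq]
      apply List.countP_eq_zero.2
      intro p hp
      simpa using hall p hp
    · intro hc
      rw [beq_iff_eq] at hc
      rw [List.all_eq_true]
      intro p hp
      simpa using List.countP_eq_zero.1 hc p hp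
  by_cases he : e ≤ 0
  · have hA : necCheckA v_cand v e = true := by
      unfold necCheckA
      rw [List.all_eq_true]
      intro p hp
      have hnodup : (PySem.Set.diff v_cand [v]).Nodup := by
        rw [hdiff]; exact h.filter _
      have hne := pyCombos2_ne hnodup p hp
      have hpos : 0 < |p.1 - p.2| := abs_pos.2 (fun hc => hne (by omega))
      simp only [decide_eq_true_eq]
      intro hc
      exact absurd (hc ▸ hpos) (not_lt.2 he)
    rw [hA]
    unfold necCheckB
    simp [he]
  · push_neg at he
    rw [hallcount]
    unfold necCheckB
    rw [if_neg (by omega)]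
    rw [diffCounter_getD, countP_combos_filter hv h, countP_neighbors he h]
    have hm1 : v_cand.contains (v - e) = decide ((v - e) ∈ v_cand) := by
      simp [List.contains_iff_mem]
    have hm2 : v_cand.contains (v + e) = decide ((v + e) ∈ v_cand) := by
      simp [List.contains_iff_mem]
    rw [hm1, hm2]
    by_cases h1 : (v - e) ∈ v_cand <;> by_cases h2 : (v + e) ∈ v_cand <;>
      simp only [h1, h2, decide_true, decide_false, if_true, if_false, Bool.false_eq_true] <;>
      push_cast <;>
      rw [show ∀ a b : Bool, a = b ↔ (a = true ↔ b = true) from fun a b => by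
        cases a <;> cases b <;> simp] <;>
      simp only [beq_iff_eq] <;>
      omega

-- one pass of A's inner loop (snapshot difference) equals B's live-filtered pass
theorem inner_loop_eq (xs : List Int) (chkA chkB : Int → Bool)
    (hchk : ∀ v ∈ xs, chkA v = chkB v) (h : xs.Nodup) (nec : List Int) :
    (PySem.Set.diff xs nec).foldl (fun n v => if chkA v then PySem.Set.add n v else n) nec
      = xs.foldl (fun n v => if !PySem.Set.contains n v && chkB v then PySem.Set.add n v else n) nec := by
  induction xs generalizing nec with
  | nil => simp [PySem.Set.diff]
  | cons x rest ih =>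
    rcases List.nodup_cons.1 h with ⟨hx, hr⟩
    have hchk' : ∀ v ∈ rest, chkA v = chkB v := fun v hv => hchk v (List.mem_cons_of_mem _ hv)
    have hchkx : chkA x = chkB x := hchk x (List.mem_cons.2 (Or.inl rfl))
    simp only [PySem.Set.diff, List.filter_cons, List.foldl_cons]
    by_cases hmem : PySem.Set.contains nec x = true
    · simp only [hmem, Bool.not_true, if_false, Bool.false_and, if_neg (by simp : ¬ (false = true))]
      exact ih hchk' hr nec
    · have hmem' : PySem.Set.contains nec x = false := Bool.eq_false_iff.2 hmem
      simp only [hmem', Bool.not_false, if_true, List.foldl_cons, Bool.true_and]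
      rw [← hchkx]
      by_cases hcx : chkA x = true
      · simp only [hcx, if_true]
        have hxnec : x ∉ nec := by simpa [PySem.Set.contains] using hmem'
        have hfilter : rest.filter (fun v => !PySem.Set.contains nec v)
            = rest.filter (fun v => !PySem.Set.contains (PySem.Set.add nec x) v) := by
          apply List.filter_congr
          intro v hv
          have hvx : v ≠ x := fun hvx => hx (hvx ▸ hv)
          simp [PySem.Set.add, PySem.Set.contains, hxnec, hvx]
        rw [hfilter]
        have := ih hchk' hr (PySem.Set.add nec x)
        simpa [PySem.Set.diff] using this
      · have hcx' : chkA x = false := Bool.eq_false_iff.2 hcx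
        simp only [hcx', if_neg (by simp : ¬ (false = true))]
        have := ih hchk' hr nec
        simpa [PySem.Set.diff] using this

-- ===== VERDICT (by name: the statement is the Claim_ definition above) =====
theorem augment_nec_py_spec : Claim_equal_augment_nec_py := by
  intro v_cand v_nec o_v_comp n_min _ hpre
  unfold Spec_augment_nec_py augment_nec_py augment_nec_py_alt
  by_cases hlen : (v_cand.length : Int) = n_min
  · simp [hlen]
  · simp only [hlen, if_false]
    have hstep : ∀ (nec : List Int) (e : Int),
        (PySem.Set.diff v_cand nec).foldl (fun n v => if necCheckA v_cand v e then PySem.Set.add n v else n) nec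
          = v_cand.foldl (fun n v => if !PySem.Set.contains n v && necCheckB v_cand (diffCounter v_cand) v e then PySem.Set.add n v else n) nec := by
      intro nec e
      exact inner_loop_eq v_cand _ _ (fun v hv => necCheck_eq hpre hv e) hpre nec
    have houter :
        o_v_comp.foldl (fun nec e =>
            (PySem.Set.diff v_cand nec).foldl (fun nec2 v =>
              if necCheckA v_cand v e then PySem.Set.add nec2 v else nec2) nec) v_nec
          = o_v_comp.foldl (fun nec e =>
            v_cand.foldl (fun nec2 v =>
              if !PySem.Set.contains nec2 v && necCheckB v_cand (diffCounter v_cand) v e then PySem.Set.add nec2 v else nec2) nec) v_nec := by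
      apply PySem.List.foldl_congr_mem
      intro nec e _
      exact hstep nec e
    rw [houter]
    set nec1 := o_v_comp.foldl (fun nec e =>
      v_cand.foldl (fun nec2 v =>
        if !PySem.Set.contains nec2 v && necCheckB v_cand (diffCounter v_cand) v e then PySem.Set.add nec2 v else nec2) nec) v_nec
    exact inner_loop_eq v_cand _ _ (fun v hv => necCheck_eq hpre hv v) hpre nec1
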